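-- pv_equiv track=rewrite | github.com/aitakaitov/TACR | analyzer.py | use_max
-- ===== SOURCE A (Python) =====
-- def use_max(w_vals):
--     temp = [[] for _ in range(len(w_vals))]
--     for i in range(len(w_vals)):
--         for j in range(len(w_vals[i])):
--             _max = 0
--             real_value = 0
--             for k in range(len(w_vals[i][j])):
--                 if abs(w_vals[i][j][k]) > _max:
--                     _max = abs(w_vals[i][j][k])
--                     real_value = w_vals[i][j][k]
--             temp[i].append(real_value)
--
--     output = [0 for _ in range(len(w_vals))]
--     for i in range(len(temp)):
--         _max = 0
--         real_val = 0
--         for j in range(len(temp[i])):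
--             if abs(temp[i][j]) > _max:
--                 _max = abs(temp[i][j])
--                 real_val = temp[i][j]
--         output[i] = real_val
--
--     return output
-- ===== SOURCE B (Python) =====
-- def use_max(w_vals):
--     result = []
--     for block in w_vals:
--         flat = [x for row in block for x in row]
--         m = max((abs(x) for x in flat), default=0)
--         result.append(next((x for x in flat if abs(x) == m), 0))
--     return result
-- ===== Notes on version B (the rewrite author's own statement) =====
-- stated objective: alternative
-- what changed: Replaces A's two-phase running-update scans (build a temp table of per-row representatives, then reduce it with the same running (max,value) update) by a per-block flatten-then-two-queries algorithm: flatten the block, take the maximum absolute value with max(default=0), and return the first element whose absolute value equals it (default 0).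
import Mathlib
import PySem

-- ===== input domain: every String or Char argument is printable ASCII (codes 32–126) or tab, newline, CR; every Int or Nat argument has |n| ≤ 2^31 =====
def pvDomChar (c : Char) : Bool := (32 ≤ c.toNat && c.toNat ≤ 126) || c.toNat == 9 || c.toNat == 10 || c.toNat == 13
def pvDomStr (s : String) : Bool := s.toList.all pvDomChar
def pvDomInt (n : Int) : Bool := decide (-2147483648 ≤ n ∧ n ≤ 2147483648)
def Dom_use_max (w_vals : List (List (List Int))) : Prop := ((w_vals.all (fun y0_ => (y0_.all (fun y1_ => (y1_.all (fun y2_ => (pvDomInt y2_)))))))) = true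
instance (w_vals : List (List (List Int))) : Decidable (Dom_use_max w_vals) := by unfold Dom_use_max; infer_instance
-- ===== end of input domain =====

-- B flattens each block, takes the largest absolute value (max with default 0) and returns the first
-- element attaining it, instead of A's two-phase running-update reduction (alternative; return value only).

-- ===== PORT A =====
-- A's inner loop state (_max, real_value), updated element by element
def pvStepA (s : Int × Int) (x : Int) : Int × Int :=
  if |x| > s.1 then (|x|, x) else s

def use_max (w_vals : List (List (List Int))) : List Int :=
  -- temp[i][j] = representative of row j of block i (first pass)
  let temp : List (List Int) :=
    w_vals.map (fun block => block.map (fun row => (row.foldl pvStepA (0, 0)).2))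
  -- second pass: reduce each temp[i] with the same update to output[i]
  temp.map (fun t => (t.foldl pvStepA (0, 0)).2)

-- ===== PORT B =====
def use_max_alt (w_vals : List (List (List Int))) : List Int :=
  w_vals.map (fun block =>
    let flat := block.flatMap (fun row => row)
    -- max((abs(x) for x in flat), default=0)
    let m := (PySem.List.max? (flat.map (fun x => |x|)) (fun y => y)).getD 0
    -- next((x for x in flat if abs(x) == m), 0)
    (flat.find? (fun x => |x| == m)).getD 0)

-- ===== PRECONDITION & SPEC =====
def Spec_use_max (w_vals : List (List (List Int))) (out : List Int) : Prop := out = use_max_alt w_vals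
instance (w_vals : List (List (List Int))) (out : List Int) : Decidable (Spec_use_max w_vals out) := by unfold Spec_use_max; infer_instance

-- ===== CLAIM (what is proved, stated in full; the proofs are below) =====
def Claim_equal_use_max : Prop := ∀ (w_vals : List (List (List Int))), Dom_use_max w_vals → Spec_use_max w_vals (use_max w_vals)

-- ===== LEMMAS AND PROOFS =====

-- recursive maximum of absolute values
def pvMaxAbs : List Int → Int
  | [] => 0
  | x :: xs => max |x| (pvMaxAbs xs)

lemma pvMaxAbs_nonneg (xs : List Int) : 0 ≤ pvMaxAbs xs := by
  induction xs with
  | nil => simp [pvMaxAbs]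
  | cons x xs ih => simp [pvMaxAbs]

lemma fold_mono (xs : List Int) (s : Int × Int) :
    s.1 ≤ (xs.foldl pvStepA s).1 := by
  induction xs generalizing s with
  | nil => simp
  | cons x xs ih =>
      refine le_trans ?_ (ih (pvStepA s x))
      simp only [pvStepA]; split_ifs with h
      · exact le_of_lt h
      · exact le_refl _

lemma fold_absEq (xs : List Int) (s : Int × Int) (h : s.1 = |s.2|) :
    (xs.foldl pvStepA s).1 = |(xs.foldl pvStepA s).2| := by
  induction xs generalizing s with
  | nil => exact h
  | cons x xs ih =>
      apply ih
      simp only [pvStepA]; split_ifs <;> simp [h]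

-- characterisation of A's running-update scan: it returns the max of |·| together with
-- the FIRST element attaining it, or the start state if nothing beats it
lemma scan_char (xs : List Int) (s : Int × Int) (h : 0 ≤ s.1) :
    xs.foldl pvStepA s =
      if pvMaxAbs xs > s.1
      then (pvMaxAbs xs, (xs.find? (fun y => |y| == pvMaxAbs xs)).getD 0)
      else s := by
  induction xs generalizing s with
  | nil =>
      simp only [List.foldl, pvMaxAbs]
      rw [if_neg]; omega
  | cons x xs ih =>
      simp only [List.foldl, pvMaxAbs]
      have hax : 0 ≤ |x| := abs_nonneg x
      have hnn := pvMaxAbs_nonneg xs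
      by_cases hxs : |x| > s.1
      · rw [show pvStepA s x = (|x|, x) from by simp [pvStepA, hxs]]
        rw [ih (|x|, x) hax]
        by_cases hT : pvMaxAbs xs > |x|
        · rw [if_pos hT, if_pos (by omega), max_eq_right (le_of_lt hT),
              List.find?_cons_of_neg (by simp; omega)]
        · rw [if_neg hT, if_pos (by omega), max_eq_left (by omega),
              List.find?_cons_of_pos (by simp)]
          simp
      · rw [show pvStepA s x = s from by simp [pvStepA]; omega]
        rw [ih s h]
        by_cases hT : pvMaxAbs xs > s.1
        · rw [if_pos hT, if_pos (by omega), max_eq_right (by omega),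
              List.find?_cons_of_neg (by simp; omega)]
        · rw [if_neg hT, if_neg (by omega)]

-- B's max-with-default equals pvMaxAbs
lemma maxD_eq (xs : List Int) :
    (PySem.List.max? (xs.map (fun x => |x|)) (fun y => y)).getD 0 = pvMaxAbs xs := by
  induction xs with
  | nil => rfl
  | cons x xs ih =>
      rw [List.map_cons, PySem.List.max?_id_cons, Option.getD_some, pvMaxAbs, ← ih]
      cases xs with
      | nil => simp [PySem.List.max?]
      | cons y ys =>
          rw [List.map_cons, PySem.List.max?_id_cons, Option.getD_some,
              List.foldl_cons, List.foldl_assoc]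

-- when the max abs is 0, B's find (first y with |y| = 0) also yields 0
lemma find_zero (xs : List Int) (h : pvMaxAbs xs = 0) :
    (xs.find? (fun y => |y| == pvMaxAbs xs)).getD 0 = 0 := by
  rw [h]
  cases hf : xs.find? (fun y => |y| == (0 : Int)) with
  | none => rfl
  | some y =>
      have := List.find?_some hf
      simp at this
      simp [this]

-- A's two-phase reduction over a block equals the scan of the flattened block
lemma block_flat (block : List (List Int)) :
    ((block.map (fun row => (row.foldl pvStepA (0, 0)).2)).foldl pvStepA (0, 0)) =
      (block.flatMap (fun row => row)).foldl pvStepA (0, 0) := by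
  -- generalize the start state
  suffices H : ∀ (s : Int × Int), 0 ≤ s.1 →
      (block.map (fun row => (row.foldl pvStepA (0, 0)).2)).foldl pvStepA s =
        (block.flatMap (fun row => row)).foldl pvStepA s from H (0, 0) le_rfl
  induction block with
  | nil => intro s _; rfl
  | cons row rows ih =>
      intro s hs
      simp only [List.map_cons, List.flatMap_cons, List.foldl_cons, List.foldl_append]
      have hnn := pvMaxAbs_nonneg row
      have hr := scan_char row (0, 0) le_rfl
      have hstep : pvStepA s (row.foldl pvStepA (0, 0)).2 = row.foldl pvStepA s := by
        rw [scan_char row s hs]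
        by_cases hT : pvMaxAbs row > 0
        · rw [if_pos hT] at hr
          have habs : pvMaxAbs row = |(row.find? (fun y => |y| == pvMaxAbs row)).getD 0| := by
            have h2 := fold_absEq row (0, 0) (by simp)
            rw [hr] at h2; exact h2
          rw [hr]
          simp only [pvStepA]
          rw [← habs]
        · rw [if_neg hT] at hr
          rw [hr, show pvStepA s ((0 : Int), (0 : Int)).2 = s from by simp [pvStepA]; omega,
              if_neg (by omega)]
      rw [hstep]
      exact ih _ (le_trans hs (fold_mono row s))

-- ===== VERDICT (by name: the statement is the Claim_ definition above) =====
theorem use_max_spec : Claim_equal_use_max := by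
  intro w_vals _
  unfold Spec_use_max use_max use_max_alt
  simp only [List.map_map]
  apply List.map_congr_left
  intro block _
  simp only [Function.comp]
  rw [block_flat, maxD_eq]
  set flat := block.flatMap (fun row => row) with hflat
  rw [scan_char flat (0, 0) le_rfl]
  by_cases hT : pvMaxAbs flat > 0
  · rw [if_pos hT]
  · rw [if_neg hT]
    have h0 : pvMaxAbs flat = 0 := le_antisymm (not_lt.1 hT) (pvMaxAbs_nonneg flat)
    rw [find_zero flat h0]
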